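-- pv_equiv track=rewrite | github.com/cloudhat/cs-deep-dive | data_structure_and_algorithm/yeongseo/lecture01/극댓값찾기.py | findlocal1D
-- ===== SOURCE A (Python) =====
-- def findlocal1D(arr):
--     """
--     - T(n) = T(n/2) + Θ(1), 이때 Θ(1)은 양쪽 확인하는 작업
--     - base case : T(1) = Θ(1)
--     => Θ(log2n)
--     """
--     if not arr:
--         return None
--     if len(arr) == 1: # arr의 길이 하나 되면 8라인에서 에러
--         return arr[0]
--     if len(arr) == 2: # [1,2]의 경우 이 조건 없다면 12라인 에러
--         return max(arr)
--
--     mid = len(arr) // 2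
--     if arr[mid] < arr[mid-1]:
--         return findlocal1D(arr[:mid])
--     elif arr[mid] < arr[mid+1]:
--         return findlocal1D(arr[mid+1:])
--     return arr[mid]
-- ===== SOURCE B (Python) =====
-- def findlocal1D(arr):
--     if not arr:
--         return None
--     lo, hi = 0, len(arr) - 1
--     while True:
--         n = hi - lo + 1
--         if n == 1:
--             return arr[lo]
--         if n == 2:
--             return max(arr[lo], arr[lo + 1])
--         mid = lo + n // 2
--         if arr[mid] < arr[mid - 1]:
--             hi = mid - 1
--         elif arr[mid] < arr[mid + 1]:
--             lo = mid + 1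
--         else:
--             return arr[mid]
-- ===== Notes on version B (the rewrite author's own statement) =====
-- stated objective: alternative
-- what changed: Replaced the recursion over freshly-copied sub-slices by an iterative while-loop binary search that maintains explicit window bounds (lo, hi) into the original list, so no slices are allocated.
import Mathlib
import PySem

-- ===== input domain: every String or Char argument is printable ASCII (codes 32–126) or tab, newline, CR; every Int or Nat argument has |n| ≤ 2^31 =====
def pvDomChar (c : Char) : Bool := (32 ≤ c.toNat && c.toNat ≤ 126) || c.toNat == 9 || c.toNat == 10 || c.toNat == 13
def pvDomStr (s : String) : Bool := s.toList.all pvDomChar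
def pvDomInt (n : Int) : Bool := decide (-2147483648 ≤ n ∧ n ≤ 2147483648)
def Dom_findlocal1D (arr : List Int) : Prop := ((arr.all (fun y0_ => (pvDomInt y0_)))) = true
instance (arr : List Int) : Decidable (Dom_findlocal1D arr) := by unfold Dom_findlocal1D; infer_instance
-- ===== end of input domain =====

-- B replaces A's recursion over fresh slice copies by an iterative binary search over explicit
-- window bounds (lo, hi) into the original list (objective: alternative decomposition).

-- ===== PORT A =====
-- Recursion on slices, exactly as the Python. Indexed accesses (arr[0], arr[mid], arr[mid-1],
-- arr[mid+1]) are ported as `getD _ 0`: each index is provably in range in its branch, so this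
-- is exact; `mid` (= len(arr)//2, nonnegative) is written inline.
def findlocal1D (arr : List Int) : Option Int :=
  if arr = [] then none
  else if arr.length = 1 then some (arr.getD 0 0)
  else if arr.length = 2 then PySem.List.max? arr (fun x => x)   -- max(arr)
  else if arr.getD (arr.length / 2) 0 < arr.getD (arr.length / 2 - 1) 0 then
    findlocal1D (PySem.List.slice arr none (some ((arr.length / 2 : Nat) : Int)))       -- arr[:mid]
  else if arr.getD (arr.length / 2) 0 < arr.getD (arr.length / 2 + 1) 0 then
    findlocal1D (PySem.List.slice arr (some (((arr.length / 2 : Nat) : Int) + 1)) none) -- arr[mid+1:]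
  else some (arr.getD (arr.length / 2) 0)
termination_by arr.length
decreasing_by
  · have hp : 0 < arr.length := List.length_pos_iff.mpr (by assumption)
    simp only [PySem.List.slice_to_natCast, List.length_take]
    omega
  · have hp : 0 < arr.length := List.length_pos_iff.mpr (by assumption)
    have hc : ((arr.length / 2 : Nat) : Int) + 1 = ((arr.length / 2 + 1 : Nat) : Int) := by
      push_cast; ring
    rw [hc, PySem.List.slice_from_natCast]
    simp only [List.length_drop]
    omega

-- ===== PORT B =====
-- The while-loop of Source B as a recursion on the shrinking window size hi - lo;
-- n (= hi - lo + 1) and mid (= lo + n // 2) are written inline.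
def altGo (arr : List Int) (lo hi : Nat) : Option Int :=
  if hi - lo + 1 = 1 then some (arr.getD lo 0)
  else if hi - lo + 1 = 2 then some (max (arr.getD lo 0) (arr.getD (lo + 1) 0))
  else if arr.getD (lo + (hi - lo + 1) / 2) 0 < arr.getD (lo + (hi - lo + 1) / 2 - 1) 0 then
    altGo arr lo (lo + (hi - lo + 1) / 2 - 1)
  else if arr.getD (lo + (hi - lo + 1) / 2) 0 < arr.getD (lo + (hi - lo + 1) / 2 + 1) 0 then
    altGo arr (lo + (hi - lo + 1) / 2 + 1) hi
  else some (arr.getD (lo + (hi - lo + 1) / 2) 0)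
termination_by hi - lo
decreasing_by
  · omega
  · omega

def findlocal1D_alt (arr : List Int) : Option Int :=
  if arr = [] then none
  else altGo arr 0 (arr.length - 1)

-- ===== PRECONDITION & SPEC =====
def Spec_findlocal1D (arr : List Int) (out : Option Int) : Prop := out = findlocal1D_alt arr
instance (arr : List Int) (out : Option Int) : Decidable (Spec_findlocal1D arr out) := by unfold Spec_findlocal1D; infer_instance

-- ===== CLAIM (what is proved, stated in full; the proofs are below) =====
def Claim_equal_findlocal1D : Prop := ∀ (arr : List Int), Dom_findlocal1D arr → Spec_findlocal1D arr (findlocal1D arr)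

-- ===== LEMMAS AND PROOFS =====

-- Indexing into the window slice arr[lo : lo+k] is indexing into arr at offset lo.
theorem getD_window (arr : List Int) (lo k i : Nat) (hik : i < k) :
    ((arr.drop lo).take k).getD i 0 = arr.getD (lo + i) 0 := by
  simp [List.getD_eq_getElem?_getD, hik, List.getElem?_drop]

-- A applied to the window arr[lo..hi] (as a slice) equals B's loop on the bounds lo, hi.
theorem go_eq (arr : List Int) (lo hi : Nat) (hlo : lo ≤ hi) (hhi : hi < arr.length) :
    findlocal1D ((arr.drop lo).take (hi - lo + 1)) = altGo arr lo hi := by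
  have hlen : ((arr.drop lo).take (hi - lo + 1)).length = hi - lo + 1 := by
    simp; omega
  have hne : (arr.drop lo).take (hi - lo + 1) ≠ [] := by
    intro h; rw [h] at hlen; simp at hlen
  rw [findlocal1D, altGo, if_neg hne, hlen]
  by_cases h1 : hi - lo + 1 = 1
  · rw [if_pos h1, if_pos h1, h1]
    simp [List.getD_eq_getElem?_getD, List.getElem?_drop]
  · rw [if_neg h1, if_neg h1]
    by_cases h2 : hi - lo + 1 = 2
    · rw [if_pos h2, if_pos h2]
      obtain ⟨a, b, hab⟩ := List.length_eq_two.mp (hlen.trans h2)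
      have ha := getD_window arr lo (hi - lo + 1) 0 (by omega)
      have hb := getD_window arr lo (hi - lo + 1) 1 (by omega)
      rw [hab] at ha hb
      simp only [List.getD_cons_zero, List.getD_cons_succ] at ha hb
      rw [hab, PySem.List.max?_id_cons]
      simp [ha, hb]
    · -- window size n = hi - lo + 1 ≥ 3
      have hn3 : 3 ≤ hi - lo + 1 := by omega
      have hmidA := getD_window arr lo (hi - lo + 1) ((hi - lo + 1) / 2) (by omega)
      have hmidL := getD_window arr lo (hi - lo + 1) ((hi - lo + 1) / 2 - 1) (by omega)
      have hmidR := getD_window arr lo (hi - lo + 1) ((hi - lo + 1) / 2 + 1) (by omega)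
      rw [show lo + ((hi - lo + 1) / 2 - 1) = lo + (hi - lo + 1) / 2 - 1 from by omega] at hmidL
      rw [show lo + ((hi - lo + 1) / 2 + 1) = lo + (hi - lo + 1) / 2 + 1 from by omega] at hmidR
      rw [if_neg h2, if_neg h2, hmidA, hmidL, hmidR]
      by_cases hL : arr.getD (lo + (hi - lo + 1) / 2) 0 < arr.getD (lo + (hi - lo + 1) / 2 - 1) 0
      · rw [if_pos hL, if_pos hL, PySem.List.slice_to_natCast, List.take_take,
          min_eq_left (by omega)]
        have hrec := go_eq arr lo (lo + (hi - lo + 1) / 2 - 1) (by omega) (by omega)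
        rw [show lo + (hi - lo + 1) / 2 - 1 - lo + 1 = (hi - lo + 1) / 2 from by omega] at hrec
        exact hrec
      · rw [if_neg hL, if_neg hL]
        by_cases hR : arr.getD (lo + (hi - lo + 1) / 2) 0 < arr.getD (lo + (hi - lo + 1) / 2 + 1) 0
        · rw [if_pos hR, if_pos hR,
            show ((((hi - lo + 1) / 2 : Nat)) : Int) + 1 = (((hi - lo + 1) / 2 + 1 : Nat) : Int)
              from by push_cast; ring,
            PySem.List.slice_from_natCast, List.drop_take, List.drop_drop]
          have hrec := go_eq arr (lo + (hi - lo + 1) / 2 + 1) hi (by omega) hhi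
          rw [show hi - (lo + (hi - lo + 1) / 2 + 1) + 1
              = (hi - lo + 1) - ((hi - lo + 1) / 2 + 1) from by omega,
            show lo + (hi - lo + 1) / 2 + 1 = lo + ((hi - lo + 1) / 2 + 1) from by omega] at hrec
          exact hrec
        · rw [if_neg hR, if_neg hR]
termination_by hi - lo

-- ===== VERDICT (by name: the statement is the Claim_ definition above) =====
theorem findlocal1D_spec : Claim_equal_findlocal1D := by
  intro arr _
  unfold Spec_findlocal1D findlocal1D_alt
  by_cases h : arr = []
  · simp [h, findlocal1D]
  · have hp : 0 < arr.length := List.length_pos_iff.mpr h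
    rw [if_neg h, ← go_eq arr 0 (arr.length - 1) (by omega) (by omega)]
    simp only [List.drop_zero]
    rw [show arr.length - 1 - 0 + 1 = arr.length from by omega, List.take_length]
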